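-- pv_equiv track=rewrite | github.com/BhuwanJoshi-01/KodeSQL | fix_button_classes.py | fix_button_classes
-- ===== SOURCE A (Python) =====
-- def fix_button_classes(content):
--     """Fix old admin-btn classes to new btn classes"""
--
--     # Define the mapping of old classes to new classes
--     class_mappings = [
--         # Basic button classes
--         ('class="admin-btn"', 'class="btn btn-primary"'),
--         ('class="admin-btn primary"', 'class="btn btn-primary"'),
--         ('class="admin-btn secondary"', 'class="btn btn-secondary"'),
--         ('class="admin-btn success"', 'class="btn btn-success"'),
--         ('class="admin-btn danger"', 'class="btn btn-danger"'),
--         ('class="admin-btn warning"', 'class="btn btn-warning"'),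
--         ('class="admin-btn info"', 'class="btn btn-info"'),
--
--         # With additional styling
--         ('class="admin-btn secondary"', 'class="btn btn-secondary"'),
--         ('class="admin-btn danger"', 'class="btn btn-danger"'),
--         ('class="admin-btn warning"', 'class="btn btn-warning"'),
--         ('class="admin-btn info"', 'class="btn btn-info"'),
--         ('class="admin-btn success"', 'class="btn btn-success"'),
--     ]
--
--     # Apply the mappings
--     for old_class, new_class in class_mappings:
--         content = content.replace(old_class, new_class)
--
--     return content
-- ===== SOURCE B (Python) =====
-- # One left-to-right scan with a prefix table, instead of 12 sequential full-string replace passes.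
--
-- _PAIRS = [
--     ('class="admin-btn primary"', 'class="btn btn-primary"'),
--     ('class="admin-btn secondary"', 'class="btn btn-secondary"'),
--     ('class="admin-btn success"', 'class="btn btn-success"'),
--     ('class="admin-btn danger"', 'class="btn btn-danger"'),
--     ('class="admin-btn warning"', 'class="btn btn-warning"'),
--     ('class="admin-btn info"', 'class="btn btn-info"'),
--     ('class="admin-btn"', 'class="btn btn-primary"'),
-- ]
--
--
-- def fix_button_classes(content):
--     """Fix old admin-btn classes to new btn classes"""
--     out = []
--     i = 0
--     n = len(content)
--     while i < n:
--         for old, new in _PAIRS: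
--             if content.startswith(old, i):
--                 out.append(new)
--                 i += len(old)
--                 break
--         else:
--             out.append(content[i])
--             i += 1
--     return "".join(out)
-- ===== Notes on version B (the rewrite author's own statement) =====
-- stated objective: alternative
-- what changed: A runs 12 sequential full-string .replace passes (one per mapping entry, with duplicates); B makes a single left-to-right scan that consults a 7-entry prefix table at each position, emitting the replacement and jumping past each matched key.
import Mathlib
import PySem

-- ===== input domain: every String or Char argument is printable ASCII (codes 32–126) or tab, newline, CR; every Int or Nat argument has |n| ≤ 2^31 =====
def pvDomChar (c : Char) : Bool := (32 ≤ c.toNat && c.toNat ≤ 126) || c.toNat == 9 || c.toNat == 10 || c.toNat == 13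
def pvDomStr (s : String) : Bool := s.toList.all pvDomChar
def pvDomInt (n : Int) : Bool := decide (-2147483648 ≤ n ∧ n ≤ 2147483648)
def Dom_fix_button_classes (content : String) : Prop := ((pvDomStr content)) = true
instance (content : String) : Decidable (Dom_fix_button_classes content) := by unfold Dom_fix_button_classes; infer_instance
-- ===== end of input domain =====

-- B replaces A's 12 sequential full-string `.replace` passes by one left-to-right scan with a
-- prefix table (objective: alternative single-pass algorithm, same return value).

-- ===== PORT A =====
def fix_button_classes (content : String) : String :=
  let class_mappings : List (String × String) :=
    [ ("class=\"admin-btn\"", "class=\"btn btn-primary\""),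
      ("class=\"admin-btn primary\"", "class=\"btn btn-primary\""),
      ("class=\"admin-btn secondary\"", "class=\"btn btn-secondary\""),
      ("class=\"admin-btn success\"", "class=\"btn btn-success\""),
      ("class=\"admin-btn danger\"", "class=\"btn btn-danger\""),
      ("class=\"admin-btn warning\"", "class=\"btn btn-warning\""),
      ("class=\"admin-btn info\"", "class=\"btn btn-info\""),
      ("class=\"admin-btn secondary\"", "class=\"btn btn-secondary\""),
      ("class=\"admin-btn danger\"", "class=\"btn btn-danger\""),
      ("class=\"admin-btn warning\"", "class=\"btn btn-warning\""),
      ("class=\"admin-btn info\"", "class=\"btn btn-info\""),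
      ("class=\"admin-btn success\"", "class=\"btn btn-success\"") ]
  class_mappings.foldl (fun content p => PySem.Str.replace content p.1 p.2) content

-- ===== PORT B =====
-- B's prefix table, in B's trial order (the 7 distinct old→new class strings)
def pvPairs : List (List Char × List Char) :=
  [ ("class=\"admin-btn primary\"".toList, "class=\"btn btn-primary\"".toList),
    ("class=\"admin-btn secondary\"".toList, "class=\"btn btn-secondary\"".toList),
    ("class=\"admin-btn success\"".toList, "class=\"btn btn-success\"".toList),
    ("class=\"admin-btn danger\"".toList, "class=\"btn btn-danger\"".toList),
    ("class=\"admin-btn warning\"".toList, "class=\"btn btn-warning\"".toList),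
    ("class=\"admin-btn info\"".toList, "class=\"btn btn-info\"".toList),
    ("class=\"admin-btn\"".toList, "class=\"btn btn-primary\"".toList) ]

-- Source B's while-loop: at each position try the table entries in order; on a match emit the
-- replacement and jump past the key, else emit the character and advance by one.
-- (All keys of pvPairs are nonempty, so `drop (kv.1.length - 1) t` is exactly Python's `i += len(old)`.)
def pvScan (s : List Char) : List Char :=
  match s with
  | [] => []
  | c :: t =>
    match pvPairs.find? (fun kv => kv.1.isPrefixOf (c :: t)) with
    | some kv => kv.2 ++ pvScan (List.drop (kv.1.length - 1) t)
    | none => c :: pvScan t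
termination_by s.length
decreasing_by
  · simp only [List.length_cons, List.length_drop]; omega
  · simp only [List.length_cons]; omega

def fix_button_classes_alt (content : String) : String :=
  String.ofList (pvScan content.toList)

-- ===== PRECONDITION & SPEC =====
def Spec_fix_button_classes (content : String) (out : String) : Prop := out = fix_button_classes_alt content
instance (content : String) (out : String) : Decidable (Spec_fix_button_classes content out) := by unfold Spec_fix_button_classes; infer_instance

-- ===== CLAIM (what is proved, stated in full; the proofs are below) =====
def Claim_equal_fix_button_classes : Prop := ∀ (content : String), Dom_fix_button_classes content → Spec_fix_button_classes content (fix_button_classes content)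

-- ===== LEMMAS AND PROOFS =====

-- A's mapping list, on the List Char side
def pvM : List (List Char × List Char) :=
  [ ("class=\"admin-btn\"".toList, "class=\"btn btn-primary\"".toList),
    ("class=\"admin-btn primary\"".toList, "class=\"btn btn-primary\"".toList),
    ("class=\"admin-btn secondary\"".toList, "class=\"btn btn-secondary\"".toList),
    ("class=\"admin-btn success\"".toList, "class=\"btn btn-success\"".toList),
    ("class=\"admin-btn danger\"".toList, "class=\"btn btn-danger\"".toList),
    ("class=\"admin-btn warning\"".toList, "class=\"btn btn-warning\"".toList),
    ("class=\"admin-btn info\"".toList, "class=\"btn btn-info\"".toList),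
    ("class=\"admin-btn secondary\"".toList, "class=\"btn btn-secondary\"".toList),
    ("class=\"admin-btn danger\"".toList, "class=\"btn btn-danger\"".toList),
    ("class=\"admin-btn warning\"".toList, "class=\"btn btn-warning\"".toList),
    ("class=\"admin-btn info\"".toList, "class=\"btn btn-info\"".toList),
    ("class=\"admin-btn success\"".toList, "class=\"btn btn-success\"".toList) ]

def pvFold (L : List (List Char × List Char)) (s : List Char) : List Char :=
  L.foldl (fun s kv => PySem.Chars.replace s kv.1 kv.2) s

-- ---- equations for PySem.Chars.replace (no library lemmas exist for it) ----

def pvRepF (k v : List Char) : Nat → List Char → List Char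
  | 0, l => l
  | _ + 1, [] => []
  | fuel + 1, c :: t =>
    if k.isPrefixOf (c :: t) then v ++ pvRepF k v fuel (List.drop k.length (c :: t))
    else c :: pvRepF k v fuel t

theorem pv_go_eq (k v : List Char) :
    ∀ (fuel : Nat) (l acc : List Char),
      PySem.Chars.replace.go k v fuel l acc = acc.reverse ++ pvRepF k v fuel l := by
  intro fuel
  induction fuel with
  | zero => intro l acc; simp only [PySem.Chars.replace.go, pvRepF]
  | succ n ih =>
      intro l acc
      cases l with
      | nil => simp only [PySem.Chars.replace.go, pvRepF]; simp
      | cons c t =>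
          simp only [PySem.Chars.replace.go, pvRepF]
          by_cases h : k.isPrefixOf (c :: t)
          · simp [h, ih]
          · simp [h, ih]

theorem pv_repF_irrel (k v : List Char) :
    ∀ (fuel : Nat) (l : List Char), k ≠ [] → l.length ≤ fuel →
      pvRepF k v fuel l = pvRepF k v l.length l := by
  intro fuel
  induction fuel using Nat.strong_induction_on with
  | _ fuel ih =>
    intro l hk hl
    cases fuel with
    | zero =>
        have hnil : l = [] := List.length_eq_zero_iff.mp (Nat.le_zero.mp hl)
        subst hnil; rfl
    | succ m =>
        cases l with
        | nil => simp [pvRepF]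
        | cons c t =>
            simp only [pvRepF, List.length_cons]
            by_cases h : k.isPrefixOf (c :: t)
            · have hk1 : 1 ≤ k.length := by
                cases k with
                | nil => exact absurd rfl hk
                | cons _ _ => simp
              have hlen : (List.drop k.length (c :: t)).length ≤ t.length := by
                simp [List.length_drop]; omega
              have h1 := ih m (by omega) (List.drop k.length (c :: t)) hk
                (by simp at hl; omega)
              have h2 := ih t.length (by simp at hl; omega) (List.drop k.length (c :: t)) hk hlen
              simp [h, h1, h2]
            · have h1 := ih m (by omega) t hk (by simp at hl; omega)
              simp [h, h1]

theorem pv_replace_eq (k v l : List Char) (hk : k ≠ []) :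
    PySem.Chars.replace l k v = pvRepF k v l.length l := by
  have hne : k.isEmpty = false := by cases k with
    | nil => exact absurd rfl hk
    | cons _ _ => rfl
  simp only [PySem.Chars.replace, hne, Bool.false_eq_true, if_false, pv_go_eq,
    List.reverse_nil, List.nil_append]

theorem pv_rep_nil (k v : List Char) (hk : k ≠ []) : PySem.Chars.replace [] k v = [] := by
  simp [pv_replace_eq _ _ _ hk, pvRepF]

theorem pv_rep_match (k v l : List Char) (hk : k ≠ []) (h : k <+: l) :
    PySem.Chars.replace l k v = v ++ PySem.Chars.replace (l.drop k.length) k v := by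
  cases l with
  | nil =>
      exfalso
      have := List.IsPrefix.length_le h
      cases k with
      | nil => exact hk rfl
      | cons _ _ => simp at this
  | cons c t =>
      have hb : k.isPrefixOf (c :: t) = true := List.isPrefixOf_iff_prefix.mpr h
      have hk1 : 1 ≤ k.length := by
        cases k with
        | nil => exact absurd rfl hk
        | cons _ _ => simp
      rw [pv_replace_eq _ _ _ hk]
      simp only [List.length_cons, pvRepF, hb, if_true]
      rw [pv_replace_eq _ _ _ hk]
      have hlen : (List.drop k.length (c :: t)).length ≤ t.length := by
        simp [List.length_drop]; omega
      rw [pv_repF_irrel k v t.length (List.drop k.length (c :: t)) hk hlen]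

theorem pv_rep_skip (k v : List Char) (c : Char) (t : List Char) (h : ¬ k <+: (c :: t)) :
    PySem.Chars.replace (c :: t) k v = c :: PySem.Chars.replace t k v := by
  have hk : k ≠ [] := by
    intro hnil; exact h (hnil ▸ List.nil_prefix)
  have hb : k.isPrefixOf (c :: t) = false := by
    by_contra hc
    exact h (List.isPrefixOf_iff_prefix.mp (by simpa using hc))
  rw [pv_replace_eq _ _ _ hk, pv_replace_eq _ _ _ hk]
  simp [pvRepF, hb]

-- ---- pass-through: a string p in which no occurrence of k can start is copied verbatim ----

abbrev pvIncomp (p k : List Char) : Prop :=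
  ∀ m, m < p.length → ¬ (p.drop m <+: k) ∧ ¬ (k <+: p.drop m)

theorem pv_trans_one (k v p : List Char) (h : pvIncomp p k) :
    ∀ rest, PySem.Chars.replace (p ++ rest) k v = p ++ PySem.Chars.replace rest k v := by
  induction p with
  | nil => intro rest; simp
  | cons c p' ih =>
      intro rest
      have hnp : ¬ k <+: (c :: (p' ++ rest)) := by
        intro hpre
        have hp2 : (c :: p') <+: c :: (p' ++ rest) := by
          exact List.cons_prefix_cons.mpr ⟨rfl, List.prefix_append p' rest⟩
        rcases List.prefix_or_prefix_of_prefix hpre hp2 with h1 | h1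
        · exact (h 0 (by simp)).2 (by simpa using h1)
        · exact (h 0 (by simp)).1 (by simpa using h1)
      rw [List.cons_append, pv_rep_skip _ _ _ _ hnp,
        ih (fun m hm => h (m + 1) (by simpa using Nat.succ_lt_succ hm)) rest]
      simp

theorem pv_fold_trans (L : List (List Char × List Char)) (p : List Char)
    (h : ∀ kv ∈ L, pvIncomp p kv.1) :
    ∀ s, pvFold L (p ++ s) = p ++ pvFold L s := by
  induction L with
  | nil => intro s; simp [pvFold]
  | cons kv L' ih =>
      intro s
      simp only [pvFold, List.foldl_cons]
      rw [pv_trans_one kv.1 kv.2 p (h kv (by simp))]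
      exact ih (fun kv' hm => h kv' (List.mem_cons_of_mem _ hm)) _

theorem pv_fold_nil (L : List (List Char × List Char)) (h : ∀ kv ∈ L, kv.1 ≠ []) :
    pvFold L [] = [] := by
  induction L with
  | nil => rfl
  | cons kv L' ih =>
      simp only [pvFold, List.foldl_cons]
      rw [pv_rep_nil _ _ (h kv (by simp))]
      exact ih (fun kv' hm => h kv' (List.mem_cons_of_mem _ hm))

-- ---- a nonempty suffix of a key that prefixes replace's output already prefixed its input ----

theorem pv_pref_through (k v K : List Char) (hk : k ≠ [])
    (hval : ∀ d ∈ K.tails, d ≠ [] → ¬ (d <+: v) ∧ ¬ (v <+: d)) :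
    ∀ (n : Nat) (s : List Char), s.length = n →
      ∀ d ∈ K.tails, d <+: PySem.Chars.replace s k v → d <+: s := by
  intro n
  induction n using Nat.strong_induction_on with
  | _ n ih =>
    intro s hs d hd hpre
    by_cases hmatch : k <+: s
    · rw [pv_rep_match _ _ _ hk hmatch] at hpre
      by_cases hdnil : d = []
      · subst hdnil; exact List.nil_prefix
      · exfalso
        rcases List.prefix_or_prefix_of_prefix hpre (List.prefix_append v _) with h1 | h1
        · exact (hval d hd hdnil).1 h1
        · exact (hval d hd hdnil).2 h1
    · cases s with
      | nil =>
          rw [pv_rep_nil _ _ hk] at hpre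
          exact hpre
      | cons c t =>
          rw [pv_rep_skip _ _ _ _ hmatch] at hpre
          cases d with
          | nil => exact List.nil_prefix
          | cons e d' =>
              rcases List.cons_prefix_cons.mp hpre with ⟨hec, hd'⟩
              have hd'mem : d' ∈ K.tails := by
                rw [List.mem_tails] at hd ⊢
                exact List.IsSuffix.trans (List.suffix_cons e d') hd
              have := ih t.length (by simp at hs; omega) t rfl d' hd'mem hd'
              exact List.cons_prefix_cons.mpr ⟨hec, this⟩

-- ---- when no key matches at the head, the whole fold copies the head character ----

theorem pv_fold_skip (L : List (List Char × List Char))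
    (hne : ∀ kv ∈ L, kv.1 ≠ [])
    (hval : ∀ kv ∈ L, ∀ kv' ∈ L, ∀ d ∈ kv'.1.tails, d ≠ [] → ¬ (d <+: kv.2) ∧ ¬ (kv.2 <+: d))
    (c : Char) :
    ∀ X, (∀ kv ∈ L, ¬ (kv.1 <+: c :: X)) → pvFold L (c :: X) = c :: pvFold L X := by
  induction L with
  | nil => intro X _; rfl
  | cons kv L' ih =>
      intro X h
      simp only [pvFold, List.foldl_cons]
      rw [pv_rep_skip _ _ _ _ (h kv (by simp))]
      have hstep : ∀ kv' ∈ L', ¬ (kv'.1 <+: c :: PySem.Chars.replace X kv.1 kv.2) := by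
        intro kv' hm hcontra
        have hm' : kv' ∈ kv :: L' := List.mem_cons_of_mem _ hm
        cases hk' : kv'.1 with
        | nil => exact hne kv' hm' hk'
        | cons e d =>
            rw [hk'] at hcontra
            rcases List.cons_prefix_cons.mp hcontra with ⟨hec, hd⟩
            have hdmem : d ∈ kv'.1.tails := by
              rw [List.mem_tails, hk']
              exact List.suffix_cons e d
            have := pv_pref_through kv.1 kv.2 kv'.1 (hne kv (by simp))
              (hval kv (by simp) kv' hm') X.length X rfl d hdmem hd
            exact h kv' hm' (by rw [hk']; exact List.cons_prefix_cons.mpr ⟨hec, this⟩)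
      have := ih (fun kv' hm => hne kv' (List.mem_cons_of_mem _ hm))
        (fun a ha b hb => hval a (List.mem_cons_of_mem _ ha) b (List.mem_cons_of_mem _ hb))
        (PySem.Chars.replace X kv.1 kv.2) hstep
      exact this

-- ---- one matched key: A's whole fold rewrites it exactly once, at the front ----

theorem pv_chain_match (pre post : List (List Char × List Char)) (kj vj : List Char)
    (hsplit : pvM = pre ++ (kj, vj) :: post) (hne : kj ≠ [])
    (hpre : ∀ kv ∈ pre, pvIncomp kj kv.1)
    (hpost : ∀ kv ∈ post, pvIncomp vj kv.1) (t : List Char) :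
    pvFold pvM (kj ++ t) = vj ++ pvFold pvM t := by
  rw [hsplit]
  have hfold : ∀ s, pvFold (pre ++ (kj, vj) :: post) s
      = pvFold post (PySem.Chars.replace (pvFold pre s) kj vj) := by
    intro s; simp [pvFold, List.foldl_append]
  rw [hfold, hfold]
  rw [pv_fold_trans pre kj hpre t]
  rw [pv_rep_match kj vj _ hne (List.prefix_append kj _), List.drop_left]
  rw [pv_fold_trans post vj hpost]

-- ---- the scanner's three step equations ----

theorem pv_scan_match (kj vj : List Char) (t : List Char) (hne : kj ≠ [])
    (h : pvPairs.find? (fun kv => kv.1.isPrefixOf (kj ++ t)) = some (kj, vj)) :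
    pvScan (kj ++ t) = vj ++ pvScan t := by
  cases kj with
  | nil => exact absurd rfl hne
  | cons c kj' =>
      rw [List.cons_append, pvScan]
      rw [← List.cons_append, h]
      simp [List.drop_left']

theorem pv_scan_skip (c : Char) (t : List Char)
    (h : pvPairs.find? (fun kv => kv.1.isPrefixOf (c :: t)) = none) :
    pvScan (c :: t) = c :: pvScan t := by
  rw [pvScan, h]

-- ---- the main equivalence on lists of characters ----

set_option maxHeartbeats 4000000 in
theorem pv_main : ∀ (n : Nat) (s : List Char), s.length = n → pvFold pvM s = pvScan s := by
  intro n
  induction n using Nat.strong_induction_on with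
  | _ n ih =>
    intro s hs
    cases s with
    | nil =>
        rw [pv_fold_nil pvM (by decide)]
        simp [pvScan]
    | cons c t =>
        cases hfind : pvPairs.find? (fun kv => kv.1.isPrefixOf (c :: t)) with
        | none =>
            rw [pv_scan_skip c t hfind]
            have hnok : ∀ kv ∈ pvPairs, ¬ (kv.1 <+: c :: t) := by
              intro kv hm hc
              exact (List.find?_eq_none.mp hfind kv hm)
                (List.isPrefixOf_iff_prefix.mpr hc)
            have hkeys : ∀ kv ∈ pvM, ∃ kv' ∈ pvPairs, kv'.1 = kv.1 := by decide
            have hMnok : ∀ kv ∈ pvM, ¬ (kv.1 <+: c :: t) := by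
              intro kv hm hc
              obtain ⟨kv', hm', he⟩ := hkeys kv hm
              exact hnok kv' hm' (he ▸ hc)
            rw [pv_fold_skip pvM (by decide) (by decide) c t hMnok]
            rw [ih t.length (by simp at hs; omega) t rfl]
        | some kv =>
            have hmem : kv ∈ pvPairs := List.mem_of_find?_eq_some hfind
            have hp : kv.1.isPrefixOf (c :: t) = true :=
              @List.find?_some _ (fun kv => kv.1.isPrefixOf (c :: t)) kv pvPairs hfind
            have hpref : kv.1 <+: c :: t := List.isPrefixOf_iff_prefix.mp hp
            obtain ⟨t', ht'⟩ := hpref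
            have hkpos : 0 < kv.1.length := by
              have hall : ∀ p ∈ pvPairs, 0 < p.1.length := by decide
              exact hall kv hmem
            have hlen : kv.1.length + t'.length = t.length + 1 := by
              have := congrArg List.length ht'
              simpa using this
            have hn : t.length + 1 = n := by simpa using hs
            have hIH : pvFold pvM t' = pvScan t' := ih t'.length (by omega) t' rfl
            rw [← ht'] at hfind ⊢
            have step : ∀ (pre post : List (List Char × List Char)) (kj vj : List Char),
                pvM = pre ++ (kj, vj) :: post → kj ≠ [] →
                (∀ kv ∈ pre, pvIncomp kj kv.1) → (∀ kv ∈ post, pvIncomp vj kv.1) →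
                pvPairs.find? (fun kv => kv.1.isPrefixOf (kj ++ t')) = some (kj, vj) →
                pvFold pvM (kj ++ t') = pvScan (kj ++ t') := by
              intro pre post kj vj h1 h2 h3 h4 h5
              rw [pv_chain_match pre post kj vj h1 h2 h3 h4 t', hIH,
                ← pv_scan_match kj vj t' h2 h5]
            fin_cases hmem
            · exact step (pvM.take 1) (pvM.drop 2) "class=\"admin-btn primary\"".toList
                "class=\"btn btn-primary\"".toList (by decide) (by decide) (by decide)
                (by decide) hfind
            · exact step (pvM.take 2) (pvM.drop 3) "class=\"admin-btn secondary\"".toList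
                "class=\"btn btn-secondary\"".toList (by decide) (by decide) (by decide)
                (by decide) hfind
            · exact step (pvM.take 3) (pvM.drop 4) "class=\"admin-btn success\"".toList
                "class=\"btn btn-success\"".toList (by decide) (by decide) (by decide)
                (by decide) hfind
            · exact step (pvM.take 4) (pvM.drop 5) "class=\"admin-btn danger\"".toList
                "class=\"btn btn-danger\"".toList (by decide) (by decide) (by decide)
                (by decide) hfind
            · exact step (pvM.take 5) (pvM.drop 6) "class=\"admin-btn warning\"".toList
                "class=\"btn btn-warning\"".toList (by decide) (by decide) (by decide)
                (by decide) hfind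
            · exact step (pvM.take 6) (pvM.drop 7) "class=\"admin-btn info\"".toList
                "class=\"btn btn-info\"".toList (by decide) (by decide) (by decide)
                (by decide) hfind
            · exact step [] (pvM.drop 1) "class=\"admin-btn\"".toList
                "class=\"btn btn-primary\"".toList (by decide) (by decide) (by decide)
                (by decide) hfind

-- ---- bridging the String-level fold of port A to pvFold ----

theorem pv_str_fold (L : List (String × String)) :
    ∀ s : String, L.foldl (fun c p => PySem.Str.replace c p.1 p.2) s
      = String.ofList (pvFold (L.map fun p => (p.1.toList, p.2.toList)) s.toList) := by
  induction L with
  | nil => intro s; simp [pvFold, String.ofList_toList]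
  | cons kv L' ih =>
      intro s
      simp only [List.foldl_cons, List.map_cons]
      rw [ih]
      simp [pvFold, PySem.Str.replace, String.toList_ofList]

-- ===== VERDICT (by name: the statement is the Claim_ definition above) =====
theorem fix_button_classes_spec : Claim_equal_fix_button_classes := by
  intro content _
  unfold Spec_fix_button_classes fix_button_classes fix_button_classes_alt
  rw [pv_str_fold]
  rw [show (([ ("class=\"admin-btn\"", "class=\"btn btn-primary\""),
      ("class=\"admin-btn primary\"", "class=\"btn btn-primary\""),
      ("class=\"admin-btn secondary\"", "class=\"btn btn-secondary\""),
      ("class=\"admin-btn success\"", "class=\"btn btn-success\""),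
      ("class=\"admin-btn danger\"", "class=\"btn btn-danger\""),
      ("class=\"admin-btn warning\"", "class=\"btn btn-warning\""),
      ("class=\"admin-btn info\"", "class=\"btn btn-info\""),
      ("class=\"admin-btn secondary\"", "class=\"btn btn-secondary\""),
      ("class=\"admin-btn danger\"", "class=\"btn btn-danger\""),
      ("class=\"admin-btn warning\"", "class=\"btn btn-warning\""),
      ("class=\"admin-btn info\"", "class=\"btn btn-info\""),
      ("class=\"admin-btn success\"", "class=\"btn btn-success\"") ] :
      List (String × String)).map fun p => (p.1.toList, p.2.toList)) = pvM from by decide]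
  rw [pv_main content.toList.length content.toList rfl]
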